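-- pv_equiv track=rewrite | github.com/AhmedMasoud135/Compiler-Design-Phases | Parsing/grammar_transforms.py | find_common_prefixes
-- ===== SOURCE A (Python) =====
-- from typing import Dict, List, Set
--
-- def find_common_prefixes(productions: List[List[str]]) -> Dict[tuple, Set[int]]:
--
--     prefixes = {}
--
--     for i in range(len(productions)):
--         for j in range(i + 1, len(productions)):
--             prod_i = productions[i]
--             prod_j = productions[j]
--
--             # Find common prefix
--             k = 0
--             while k < len(prod_i) and k < len(prod_j) and prod_i[k] == prod_j[k]:
--                 k += 1
--
--             if k > 0:  # Found common prefix
--                 prefix = tuple(prod_i[:k])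
--                 if prefix not in prefixes:
--                     prefixes[prefix] = {i, j}
--                 else:
--                     prefixes[prefix].add(i)
--                     prefixes[prefix].add(j)
--
--     return prefixes
-- ===== SOURCE B (Python) =====
-- def find_common_prefixes(productions):
--     # Prefix index: prefix -> [(production index, symbol that follows it, or None), ...]
--     occs = {}
--     for i, prod in enumerate(productions):
--         for k in range(1, len(prod) + 1):
--             occs.setdefault(tuple(prod[:k]), []).append((i, prod[k] if k < len(prod) else None))
--
--     prefixes = {}
--     for i, prod in enumerate(productions):
--         # For each later production, the depth at which it stops sharing a prefix with prod.
--         split_at = {}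
--         for k in range(1, len(prod) + 1):
--             here = prod[k] if k < len(prod) else None
--             for j, sym in occs[tuple(prod[:k])]:
--                 if j > i and (here is None or sym != here):
--                     split_at[j] = k
--         for j in sorted(split_at):
--             prefixes.setdefault(tuple(prod[:split_at[j]]), set()).update((i, j))
--     return prefixes
-- ===== Notes on version B (the rewrite author's own statement) =====
-- stated objective: alternative
-- what changed: Replaces the all-pairs scan that recomputes each longest common prefix with a per-pair while loop by a prefix index built in one pass (prefix -> productions passing through it with their following symbol); each production then reads the exact divergence depth of every later production off the index buckets, so no per-pair symbol-by-symbol comparison remains.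
import Mathlib
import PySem

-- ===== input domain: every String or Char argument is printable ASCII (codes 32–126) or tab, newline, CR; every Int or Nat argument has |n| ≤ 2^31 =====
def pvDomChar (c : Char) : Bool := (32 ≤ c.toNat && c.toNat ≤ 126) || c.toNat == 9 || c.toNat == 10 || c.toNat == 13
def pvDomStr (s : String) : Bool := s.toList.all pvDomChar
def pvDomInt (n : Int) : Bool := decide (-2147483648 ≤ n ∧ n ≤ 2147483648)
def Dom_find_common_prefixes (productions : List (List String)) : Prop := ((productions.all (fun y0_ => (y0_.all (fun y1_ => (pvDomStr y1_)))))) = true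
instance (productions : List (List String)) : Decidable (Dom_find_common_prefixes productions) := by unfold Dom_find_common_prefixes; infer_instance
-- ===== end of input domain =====

-- B replaces A's per-pair symbol-by-symbol longest-common-prefix loops by a prefix index
-- built once, from which each production reads every later production's divergence depth
-- (objective: alternative algorithm of similar cost).

-- ===== PORT A =====
-- the inner `while k < len(prod_i) and k < len(prod_j) and prod_i[k] == prod_j[k]: k += 1`
-- as the obvious structural recursion over the same two lists
def pvLcpLen : List String → List String → Nat
  | a :: as, b :: bs => if a = b then pvLcpLen as bs + 1 else 0
  | _, _ => 0

def find_common_prefixes (productions : List (List String)) : List (List String × List Int) :=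
  let n := PySem.List.len productions
  ((PySem.List.pyRange 0 n).foldl (fun prefixes i =>
    (PySem.List.pyRange (i + 1) n).foldl (fun prefixes j =>
      let prod_i := PySem.List.pyGetD productions i []
      let prod_j := PySem.List.pyGetD productions j []
      let k : Int := (pvLcpLen prod_i prod_j : Int)
      if 0 < k then
        let pfx := PySem.List.slice prod_i none (some k)   -- prod_i[:k]
        if prefixes.contains pfx = false then
          prefixes.insert pfx (PySem.Set.ofList [i, j])    -- prefixes[prefix] = {i, j}
        else
          -- prefixes[prefix].add(i); prefixes[prefix].add(j)  (two in-place adds = one modify)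
          prefixes.modify pfx [] (fun s => (PySem.Set.add s i).add j)
      else prefixes) prefixes)
    (PySem.Dict.empty : PySem.Dict (List String) (PySem.Set Int))).items

-- ===== PORT B =====
def find_common_prefixes_alt (productions : List (List String)) : List (List String × List Int) :=
  -- occs: prefix -> [(production index, symbol that follows it, or None), ...]
  -- `prod[k] if k < len(prod) else None` is exactly pyGet? for 1 ≤ k ≤ len(prod)
  let occs : PySem.Dict (List String) (List (Int × Option String)) :=
    (PySem.List.enumerate productions).foldl (fun occs ip =>
      (PySem.List.pyRange 1 (PySem.List.len ip.2 + 1)).foldl (fun occs k =>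
        -- occs.setdefault(tuple(prod[:k]), []).append(...)
        occs.modify (PySem.List.slice ip.2 none (some k)) []
          (fun l => l ++ [(ip.1, PySem.List.pyGet? ip.2 k)])) occs) PySem.Dict.empty
  ((PySem.List.enumerate productions).foldl (fun prefixes ip =>
    let splitAt : PySem.Dict Int Int :=
      (PySem.List.pyRange 1 (PySem.List.len ip.2 + 1)).foldl (fun splitAt k =>
        let here := PySem.List.pyGet? ip.2 k
        -- occs[tuple(prod[:k])]: the key is always present (prod's own prefixes were indexed)
        (occs.getD (PySem.List.slice ip.2 none (some k)) []).foldl (fun splitAt js =>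
          if ip.1 < js.1 ∧ (here = none ∨ js.2 ≠ here) then splitAt.insert js.1 k
          else splitAt) splitAt) PySem.Dict.empty
    (PySem.List.sorted splitAt.keys (fun j => j) false).foldl (fun prefixes j =>
      -- prefixes.setdefault(tuple(prod[:split_at[j]]), set()).update((i, j)); split_at[j] is present
      prefixes.modify (PySem.List.slice ip.2 none (some (splitAt.getD j 0))) []
        (fun s => (PySem.Set.add s ip.1).add j)) prefixes)
    (PySem.Dict.empty : PySem.Dict (List String) (PySem.Set Int))).items

-- ===== PRECONDITION & SPEC =====
def Spec_find_common_prefixes (productions : List (List String)) (out : List (List String × List Int)) : Prop := out = find_common_prefixes_alt productions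
instance (productions : List (List String)) (out : List (List String × List Int)) : Decidable (Spec_find_common_prefixes productions out) := by unfold Spec_find_common_prefixes; infer_instance

-- ===== CLAIM (what is proved, stated in full; the proofs are below) =====
def Claim_equal_find_common_prefixes : Prop := ∀ (productions : List (List String)), Dom_find_common_prefixes productions → Spec_find_common_prefixes productions (find_common_prefixes productions)

-- ===== LEMMAS AND PROOFS =====

-- ---------- the prefix-occurrence index, characterised ----------

def pvOcc (xs : List (List String)) (p : List String) : List (Int × Option String) :=
  ((PySem.List.enumerate xs).filter (fun ip => decide (p <+: ip.2))).map
    (fun ip => (ip.1, ip.2[p.length]?))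

def pvAO (xs : List (List String)) : List (List String × (Int × Option String)) :=
  (PySem.List.enumerate xs).flatMap (fun ip =>
    (PySem.List.pyRange 1 (PySem.List.len ip.2 + 1)).map (fun k =>
      (PySem.List.slice ip.2 none (some k), (ip.1, PySem.List.pyGet? ip.2 k))))

def pvOccs (xs : List (List String)) : PySem.Dict (List String) (List (Int × Option String)) :=
  (PySem.List.enumerate xs).foldl (fun occs ip =>
    (PySem.List.pyRange 1 (PySem.List.len ip.2 + 1)).foldl (fun occs k =>
      occs.modify (PySem.List.slice ip.2 none (some k)) []
        (fun l => l ++ [(ip.1, PySem.List.pyGet? ip.2 k)])) occs) PySem.Dict.empty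

lemma pvOccs_eq (xs : List (List String)) :
    pvOccs xs = (pvAO xs).foldl (fun d pr => d.modify pr.1 [] (fun l => l ++ [pr.2])) PySem.Dict.empty := by
  unfold pvOccs pvAO
  rw [List.foldl_flatMap]
  apply PySem.List.foldl_congr_mem
  intro d ip _
  rw [List.foldl_map]

lemma pvFlatMap_if {α β : Type} (q : α → Bool) (g : α → β) : ∀ l : List α,
    l.flatMap (fun x => if q x then [g x] else []) = (l.filter q).map g
  | [] => rfl
  | x :: t => by
    by_cases hx : q x = true
    · rw [List.flatMap_cons, if_pos hx, List.filter_cons, if_pos hx, List.map_cons,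
        pvFlatMap_if q g t]
      rfl
    · rw [List.flatMap_cons, if_neg hx, List.filter_cons, if_neg hx, pvFlatMap_if q g t]
      rfl

lemma pvFilterRange (q : Nat → Bool) (a : Nat) : ∀ L : Nat, (∀ k, k < L → (q k = true ↔ k = a)) →
    (List.range L).filter q = if a < L then [a] else [] := by
  intro L
  induction L with
  | zero => intro _; simp
  | succ L ih =>
    intro h
    rw [List.range_succ, List.filter_append]
    by_cases haL : a < L
    · rw [ih (fun k hk => h k (by omega)), if_pos haL, if_pos (by omega)]
      have : q L = false := by
        rcases Bool.eq_false_or_eq_true (q L) with h1 | h0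
        · exact absurd ((h L (by omega)).1 h1) (by omega)
        · exact h0
      simp [this]
    · rw [ih (fun k hk => h k (by omega)), if_neg haL]
      by_cases haL2 : a = L
      · rw [if_pos (by omega)]
        have : q L = true := (h L (by omega)).2 haL2.symm
        simp [this, haL2]
      · rw [if_neg (by omega)]
        have : q L = false := by
          rcases Bool.eq_false_or_eq_true (q L) with h1 | h0
          · exact absurd ((h L (by omega)).1 h1) (by omega)
          · exact h0
        simp [this]

lemma pvInnerFilter {β : Type} (prod p : List String) (f : Int → β) (hp : p ≠ []) :
    ((PySem.List.pyRange 1 (PySem.List.len prod + 1)).map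
        (fun k => (PySem.List.slice prod none (some k), f k))).filter (fun q => q.1 == p)
    = if p <+: prod then [(p, f (p.length : Int))] else [] := by
  have hm0 : 0 < p.length := List.length_pos_iff.2 hp
  have hL : (((prod.length : Int)) + 1 - 1).toNat = prod.length := by omega
  have hslice : ∀ k : Nat, PySem.List.slice prod none (some ((1 : Int) + (k : Int)))
      = prod.take (k + 1) := by
    intro k
    have h1 : ((1 : Int) + (k : Int)) = (((k + 1 : Nat) : Int)) := by push_cast; ring
    rw [h1, PySem.List.slice_to _ (by positivity), Int.toNat_natCast]
  rw [PySem.List.len_eq, PySem.List.pyRange_one, hL, List.map_map, List.filter_map]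
  simp only [Function.comp_def, hslice]
  by_cases hpre : p <+: prod
  · have hlen : p.length ≤ prod.length := hpre.length_le
    have hfil := pvFilterRange (fun x => List.take (x + 1) prod == p) (p.length - 1) prod.length
      (fun k hk => by
        constructor
        · intro hq
          have hq' : prod.take (k + 1) = p := by simpa using hq
          have : p.length = k + 1 := by rw [← hq', List.length_take]; omega
          omega
        · intro hk'
          have h1 : k + 1 = p.length := by omega
          simp only [h1]
          simp [(List.prefix_iff_eq_take.1 hpre).symm])
    rw [if_pos (by omega)] at hfil
    rw [hfil, if_pos hpre, List.map_singleton]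
    have h1 : p.length - 1 + 1 = p.length := by omega
    have h2 : ((1 : Int) + ((p.length - 1 : Nat) : Int)) = ((p.length : Nat) : Int) := by
      push_cast [hm0]
      omega
    rw [h1, h2, (List.prefix_iff_eq_take.1 hpre).symm]
  · have hfil := pvFilterRange (fun x => List.take (x + 1) prod == p) prod.length prod.length
      (fun k hk => by
        constructor
        · intro hq
          exfalso
          have hq' : prod.take (k + 1) = p := by simpa using hq
          exact hpre (hq' ▸ List.take_prefix _ _)
        · omega)
    rw [if_neg (by omega)] at hfil
    rw [hfil, if_neg hpre, List.map_nil]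

lemma pvAO_filter (xs : List (List String)) (p : List String) (hp : p ≠ []) :
    (pvAO xs).filter (fun q => q.1 == p)
    = ((PySem.List.enumerate xs).filter (fun ip => decide (p <+: ip.2))).map
        (fun ip => (p, (ip.1, ip.2[p.length]?))) := by
  unfold pvAO
  rw [List.filter_flatMap]
  have h1 : ∀ ip : Int × List String,
      ((PySem.List.pyRange 1 (PySem.List.len ip.2 + 1)).map
        (fun k => (PySem.List.slice ip.2 none (some k), (ip.1, PySem.List.pyGet? ip.2 k)))).filter
          (fun q => q.1 == p)
      = if decide (p <+: ip.2) = true then [(p, (ip.1, ip.2[p.length]?))] else [] := by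
    intro ip
    rw [pvInnerFilter ip.2 p (fun k => (ip.1, PySem.List.pyGet? ip.2 k)) hp]
    by_cases hpre : p <+: ip.2
    · rw [if_pos hpre, if_pos (decide_eq_true hpre), PySem.List.pyGet?_natCast]
    · rw [if_neg hpre, if_neg (by simp [hpre])]
  calc (PySem.List.enumerate xs).flatMap (fun ip =>
        ((PySem.List.pyRange 1 (PySem.List.len ip.2 + 1)).map
          (fun k => (PySem.List.slice ip.2 none (some k), (ip.1, PySem.List.pyGet? ip.2 k)))).filter
            (fun q => q.1 == p))
      = (PySem.List.enumerate xs).flatMap (fun ip =>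
          if decide (p <+: ip.2) = true then [(p, (ip.1, ip.2[p.length]?))] else []) := by
        simp only [List.flatMap_def]
        congr 1
        exact List.map_congr_left (fun ip _ => h1 ip)
    _ = ((PySem.List.enumerate xs).filter (fun ip => decide (p <+: ip.2))).map
        (fun ip => (p, (ip.1, ip.2[p.length]?))) := pvFlatMap_if _ _ _

lemma pvOccs_getD (xs : List (List String)) (p : List String) (hp : p ≠ []) :
    (pvOccs xs).getD p [] = pvOcc xs p := by
  rw [pvOccs_eq, PySem.Dict.getD_foldl_modify_append, PySem.Dict.getD_empty, List.nil_append,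
    pvAO_filter xs p hp]
  unfold pvOcc
  rw [List.map_map]
  rfl

-- ---------- facts about pvLcpLen ----------

lemma pvLcpLen_le_left : ∀ u v : List String, pvLcpLen u v ≤ u.length
  | [], _ => by simp [pvLcpLen]
  | _ :: _, [] => by simp [pvLcpLen]
  | a :: u, b :: v => by
    by_cases h : a = b
    · simp only [pvLcpLen, if_pos h, List.length_cons]
      exact Nat.succ_le_succ (pvLcpLen_le_left u v)
    · simp [pvLcpLen, if_neg h]

lemma pvLcpLen_take : ∀ u v : List String, u.take (pvLcpLen u v) = v.take (pvLcpLen u v)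
  | [], v => by simp [pvLcpLen]
  | _ :: _, [] => by simp [pvLcpLen]
  | a :: u, b :: v => by
    by_cases h : a = b
    · subst h
      simp only [pvLcpLen, if_pos trivial, List.take_succ_cons, pvLcpLen_take u v]
    · simp [pvLcpLen, if_neg h]

lemma pvLcpLen_cross : ∀ u v : List String,
    u[pvLcpLen u v]? ≠ v[pvLcpLen u v]? ∨ u[pvLcpLen u v]? = none
  | [], v => by
    right; simp [pvLcpLen]
  | a :: u, [] => by
    left; simp [pvLcpLen]
  | a :: u, b :: v => by
    by_cases h : a = b
    · simpa only [pvLcpLen, if_pos h, List.getElem?_cons_succ] using pvLcpLen_cross u v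
    · left
      simp only [pvLcpLen, if_neg h, List.getElem?_cons_zero]
      intro hc
      exact h (by simpa using hc)

lemma pvLcpLen_unique : ∀ (u v : List String) (m : Nat), m ≤ u.length →
    u.take m = v.take m → (u[m]? ≠ v[m]? ∨ u[m]? = none) → m = pvLcpLen u v := by
  intro u
  induction u with
  | nil =>
    intro v m hm _ _
    have hm0 : m = 0 := by simpa using hm
    subst hm0
    simp [pvLcpLen]
  | cons a u ih =>
    intro v m hm htake hcross
    cases v with
    | nil =>
      cases m with
      | zero => simp [pvLcpLen]
      | succ m => simp at htake
    | cons b v =>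
      by_cases hab : a = b
      · cases m with
        | zero =>
          exfalso
          rcases hcross with h | h
          · exact h (by simp [hab])
          · simp at h
        | succ m =>
          simp only [List.take_succ_cons, List.cons.injEq] at htake
          simp only [List.getElem?_cons_succ] at hcross
          simp only [pvLcpLen, if_pos hab]
          exact congrArg (· + 1) (ih v m (by simpa using hm) htake.2 hcross)
      · cases m with
        | zero => simp [pvLcpLen, if_neg hab]
        | succ m =>
          exfalso
          simp only [List.take_succ_cons, List.cons.injEq] at htake
          exact hab htake.1

-- ---------- the divergence condition is 'exact longest common prefix' ----------

lemma pvCond_iff (prod v : List String) (m : Nat) (_h1 : 1 ≤ m) (h2 : m ≤ prod.length) :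
    ((prod.take m <+: v) ∧ (prod[m]? = none ∨ v[m]? ≠ prod[m]?)) ↔ pvLcpLen prod v = m := by
  constructor
  · rintro ⟨hpre, hcross⟩
    have htake : prod.take m = v.take m := by
      have h := List.prefix_iff_eq_take.1 hpre
      rw [List.length_take, Nat.min_eq_left h2] at h
      exact h
    refine (pvLcpLen_unique prod v m h2 htake ?_).symm
    rcases hcross with h | h
    · exact Or.inr h
    · exact Or.inl (fun hc => h hc.symm)
  · intro hl
    have htake : prod.take m = v.take m := by rw [← hl]; exact pvLcpLen_take prod v
    refine ⟨?_, ?_⟩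
    · rw [htake]; exact List.take_prefix _ _
    · rcases pvLcpLen_cross prod v with h | h
      · rw [hl] at h
        exact Or.inr (fun hc => h hc.symm)
      · rw [hl] at h
        exact Or.inl h

-- ---------- the split-depth dictionary, characterised ----------

def pvBlock (xs : List (List String)) (i : Int) (prod : List String) (m : Nat) : List (Int × Int) :=
  ((pvOcc xs (prod.take m)).filter
      (fun js => decide (i < js.1 ∧ (prod[m]? = none ∨ js.2 ≠ prod[m]?)))).map
    (fun js => (js.1, (m : Int)))

def pvSij (xs : List (List String)) (i : Int) (prod : List String) : List (Int × Int) :=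
  (List.range prod.length).flatMap (fun t => pvBlock xs i prod (t + 1))

def pvSplit (xs : List (List String)) (i : Int) (prod : List String) : PySem.Dict Int Int :=
  (pvSij xs i prod).foldl (fun sp pr => sp.insert pr.1 pr.2) PySem.Dict.empty

lemma pvOcc_mem (xs : List (List String)) (p : List String) (js : Int × Option String) :
    js ∈ pvOcc xs p ↔ ∃ (jm : Nat) (_ : jm < xs.length),
      js = ((jm : Int), xs[jm][p.length]?) ∧ p <+: xs[jm] := by
  unfold pvOcc
  constructor
  · intro h
    rcases List.mem_map.1 h with ⟨ip, hip, rfl⟩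
    rcases List.mem_filter.1 hip with ⟨hmem, hpre⟩
    rcases (PySem.List.mem_enumerate_iff xs 0 ip).1 hmem with ⟨jm, hjm, rfl⟩
    exact ⟨jm, hjm, by simp, by simpa using hpre⟩
  · rintro ⟨jm, hjm, rfl, hpre⟩
    refine List.mem_map.2 ⟨((0 : Int) + (jm : Nat), xs[jm]),
      List.mem_filter.2 ⟨?_, by simpa using hpre⟩, by simp⟩
    exact (PySem.List.mem_enumerate_iff xs 0 _).2 ⟨jm, hjm, rfl⟩

lemma pvBlock_mem (xs : List (List String)) (i : Int) (prod : List String) (m : Nat)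
    (h1 : 1 ≤ m) (h2 : m ≤ prod.length) (pr : Int × Int) :
    pr ∈ pvBlock xs i prod m ↔ ∃ (jm : Nat) (_ : jm < xs.length),
      pr = ((jm : Int), (m : Int)) ∧ i < (jm : Int) ∧ pvLcpLen prod xs[jm] = m := by
  have hlen : (prod.take m).length = m := by
    rw [List.length_take]; omega
  unfold pvBlock
  constructor
  · intro h
    rcases List.mem_map.1 h with ⟨js, hjs, rfl⟩
    rcases List.mem_filter.1 hjs with ⟨hocc, hcond⟩
    rcases (pvOcc_mem xs _ js).1 hocc with ⟨jm, hjm, rfl, hpre⟩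
    have hc : i < (jm : Int) ∧ (prod[m]? = none ∨ xs[jm][(prod.take m).length]? ≠ prod[m]?) :=
      of_decide_eq_true hcond
    rcases hc with ⟨hij, hcr⟩
    have hlcp : pvLcpLen prod xs[jm] = m := by
      apply (pvCond_iff prod xs[jm] m h1 h2).1
      refine ⟨hpre, ?_⟩
      rw [← hlen]
      simpa [hlen] using hcr
    exact ⟨jm, hjm, rfl, hij, hlcp⟩
  · rintro ⟨jm, hjm, rfl, hij, hlcp⟩
    rcases (pvCond_iff prod xs[jm] m h1 h2).2 hlcp with ⟨hpre, hcr⟩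
    refine List.mem_map.2 ⟨((jm : Int), xs[jm][(prod.take m).length]?), ?_, rfl⟩
    refine List.mem_filter.2 ⟨(pvOcc_mem xs _ _).2 ⟨jm, hjm, rfl, hpre⟩, ?_⟩
    apply decide_eq_true
    exact ⟨hij, by simpa [hlen] using hcr⟩

lemma pvSij_mem (xs : List (List String)) (i : Int) (prod : List String) (pr : Int × Int) :
    pr ∈ pvSij xs i prod ↔ ∃ (jm : Nat) (_ : jm < xs.length),
      pr = ((jm : Int), (pvLcpLen prod xs[jm] : Int)) ∧ i < (jm : Int) ∧
        1 ≤ pvLcpLen prod xs[jm] := by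
  unfold pvSij
  rw [List.mem_flatMap]
  constructor
  · rintro ⟨t, ht, hpr⟩
    have ht' : t < prod.length := List.mem_range.1 ht
    rcases (pvBlock_mem xs i prod (t + 1) (by omega) (by omega) pr).1 hpr with
      ⟨jm, hjm, rfl, hij, hlcp⟩
    exact ⟨jm, hjm, by rw [hlcp], hij, by omega⟩
  · rintro ⟨jm, hjm, rfl, hij, hpos⟩
    have hle : pvLcpLen prod xs[jm] ≤ prod.length := pvLcpLen_le_left _ _
    refine ⟨pvLcpLen prod xs[jm] - 1, List.mem_range.2 (by omega), ?_⟩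
    apply (pvBlock_mem xs i prod (pvLcpLen prod xs[jm] - 1 + 1) (by omega) (by omega) _).2
    exact ⟨jm, hjm, by rw [Nat.sub_add_cancel hpos], hij, (Nat.sub_add_cancel hpos).symm⟩

lemma pvBlock_fst_pairwise (xs : List (List String)) (i : Int) (prod : List String) (m : Nat) :
    ((pvBlock xs i prod m).map (·.1)).Pairwise (· < ·) := by
  unfold pvBlock pvOcc
  rw [List.map_map, List.pairwise_map]
  apply List.Pairwise.filter
  rw [List.pairwise_map]
  apply List.Pairwise.filter
  exact (PySem.List.pairwise_lt_enumerate xs 0).imp (fun h => h)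

lemma pvSij_fst_nodup (xs : List (List String)) (i : Int) (prod : List String) :
    ((pvSij xs i prod).map (·.1)).Nodup := by
  unfold pvSij
  rw [List.map_flatMap]
  rw [List.flatMap_def, List.nodup_flatten]
  constructor
  · intro l hl
    rcases List.mem_map.1 hl with ⟨t, _, rfl⟩
    exact (pvBlock_fst_pairwise xs i prod (t + 1)).nodup
  · rw [List.pairwise_map]
    apply List.pairwise_lt_range.imp_of_mem
    intro t t' ht ht' htt j hj hj'
    have ht2 : t < prod.length := List.mem_range.1 ht
    have ht2' : t' < prod.length := List.mem_range.1 ht'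
    rcases List.mem_map.1 hj with ⟨pr, hpr, rfl⟩
    rcases List.mem_map.1 hj' with ⟨pr', hpr', hfst⟩
    rcases (pvBlock_mem xs i prod (t + 1) (by omega) (by omega) pr).1 hpr with
      ⟨jm, hjm, rfl, _, hlcp⟩
    rcases (pvBlock_mem xs i prod (t' + 1) (by omega) (by omega) pr').1 hpr' with
      ⟨jm', hjm', rfl, _, hlcp'⟩
    have hjj : (jm' : Int) = (jm : Int) := by simpa using hfst
    have : jm' = jm := by exact_mod_cast hjj
    subst this
    omega

lemma pvSplit_items (xs : List (List String)) (i : Int) (prod : List String) :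
    (pvSplit xs i prod).items = pvSij xs i prod := by
  unfold pvSplit
  have h := PySem.Dict.items_foldl_insert_fresh (pvSij xs i prod)
    (fun pr : Int × Int => pr.1) (fun pr : Int × Int => pr.2) PySem.Dict.empty
    (fun a _ => PySem.Dict.contains_empty _) (pvSij_fst_nodup xs i prod)
  simpa using h

lemma pvSplit_keys (xs : List (List String)) (i : Int) (prod : List String) :
    (pvSplit xs i prod).keys = (pvSij xs i prod).map (·.1) := by
  show (pvSplit xs i prod).items.map (·.1) = _
  rw [pvSplit_items]

lemma pvSplit_getD (xs : List (List String)) (i : Int) (prod : List String)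
    (jm : Nat) (hjm : jm < xs.length) (hij : i < (jm : Int))
    (hpos : 1 ≤ pvLcpLen prod xs[jm]) :
    (pvSplit xs i prod).getD (jm : Int) 0 = (pvLcpLen prod xs[jm] : Int) := by
  refine PySem.Dict.getD_of_mem_items _ ?_ ?_ 0
  · rw [pvSplit_items]
    exact (pvSij_mem xs i prod _).2 ⟨jm, hjm, rfl, hij, hpos⟩
  · rw [pvSplit_keys]
    exact pvSij_fst_nodup xs i prod

-- ---------- A's inner loop and B's inner loops over the same index list ----------

def pvLA (xs : List (List String)) (i : Int) (prod : List String) : List Int :=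
  (PySem.List.pyRange (i + 1) (PySem.List.len xs)).filter
    (fun j => decide ((0 : Int) < (pvLcpLen prod (PySem.List.pyGetD xs j []) : Int)))

lemma pvLA_mem (xs : List (List String)) (i : Int) (hi : 0 ≤ i) (prod : List String) (j : Int) :
    j ∈ pvLA xs i prod ↔ ∃ (jm : Nat) (_ : jm < xs.length),
      j = (jm : Int) ∧ i < j ∧ 1 ≤ pvLcpLen prod xs[jm] := by
  unfold pvLA
  rw [List.mem_filter, PySem.List.len_eq, PySem.List.mem_pyRange_one]
  constructor
  · rintro ⟨⟨hj1, hj2⟩, hq⟩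
    have h0 : 0 ≤ j := by omega
    have hget : PySem.List.pyGetD xs j [] = xs[j.toNat]'(by omega) :=
      PySem.List.pyGetD_eq_getElem xs [] h0 hj2
    refine ⟨j.toNat, by omega, by omega, by omega, ?_⟩
    have hq' := of_decide_eq_true hq
    rw [hget] at hq'
    omega
  · rintro ⟨jm, hjm, rfl, hij, hpos⟩
    have hget : PySem.List.pyGetD xs ((jm : Nat) : Int) [] = xs[jm] := by
      rw [PySem.List.pyGetD_eq_getElem xs [] (by positivity) (by exact_mod_cast hjm)]
      simp
    refine ⟨⟨by omega, by exact_mod_cast hjm⟩, decide_eq_true ?_⟩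
    rw [hget]
    omega

lemma pvLA_nodup (xs : List (List String)) (i : Int) (prod : List String) :
    (pvLA xs i prod).Nodup :=
  (PySem.List.nodup_pyRange_one _ _).filter _

lemma pvLA_pairwise (xs : List (List String)) (i : Int) (prod : List String) :
    (pvLA xs i prod).Pairwise (fun a b => (fun j => j) a < (fun j => j) b) :=
  ((PySem.List.pairwise_lt_pyRange_one _ _).filter _).imp (fun h => h)

lemma pvSorted_keys (xs : List (List String)) (i : Int) (hi : 0 ≤ i) (prod : List String) :
    PySem.List.sorted (pvSplit xs i prod).keys (fun j => j) false = pvLA xs i prod := by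
  apply PySem.List.sorted_eq_of_perm_of_pairwise_lt
  · apply (List.perm_ext_iff_of_nodup (pvLA_nodup xs i prod) ?_).2
    · intro j
      rw [pvLA_mem xs i hi prod, pvSplit_keys]
      constructor
      · rintro ⟨jm, hjm, rfl, hij, hpos⟩
        exact List.mem_map.2 ⟨((jm : Int), (pvLcpLen prod xs[jm] : Int)),
          (pvSij_mem xs i prod _).2 ⟨jm, hjm, rfl, hij, hpos⟩, rfl⟩
      · intro h
        rcases List.mem_map.1 h with ⟨pr, hpr, rfl⟩
        rcases (pvSij_mem xs i prod pr).1 hpr with ⟨jm, hjm, rfl, hij, hpos⟩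
        exact ⟨jm, hjm, rfl, hij, hpos⟩
    · rw [pvSplit_keys]
      exact pvSij_fst_nodup xs i prod
  · exact pvLA_pairwise xs i prod

-- ---------- the two per-pair dictionary updates agree ----------

lemma pvModify_branch (d : PySem.Dict (List String) (PySem.Set Int)) (p : List String)
    (i j : Int) :
    (if d.contains p = false then d.insert p (PySem.Set.ofList [i, j])
     else d.modify p [] (fun s => (PySem.Set.add s i).add j))
    = d.modify p [] (fun s => (PySem.Set.add s i).add j) := by
  by_cases h : d.contains p = false
  · rw [if_pos h]
    simp only [PySem.Dict.modify]
    rw [PySem.Dict.getD_of_not_contains d [] h]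
    rfl
  · rw [if_neg h]

-- ---------- B's split-depth fold is pvSplit ----------

lemma pvRange_shift (prod : List String) :
    PySem.List.pyRange 1 ((prod.length : Int) + 1)
      = (List.range prod.length).map (fun t => (1 : Int) + (t : Nat)) := by
  rw [PySem.List.pyRange_one,
    show (((prod.length : Int)) + 1 - 1).toNat = prod.length from by omega]

lemma pvSliceShift (prod : List String) (t : Nat) :
    PySem.List.slice prod none (some ((1 : Int) + (t : Int))) = prod.take (t + 1) := by
  have h1 : ((1 : Int) + (t : Int)) = (((t + 1 : Nat) : Int)) := by push_cast; ring
  rw [h1, PySem.List.slice_to _ (by positivity), Int.toNat_natCast]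

lemma pvBInner_eq (xs : List (List String)) (i : Int) (prod : List String) :
    ((PySem.List.pyRange 1 (PySem.List.len prod + 1)).foldl (fun splitAt k =>
        ((pvOccs xs).getD (PySem.List.slice prod none (some k)) []).foldl (fun splitAt js =>
          if i < js.1 ∧ (PySem.List.pyGet? prod k = none ∨ js.2 ≠ PySem.List.pyGet? prod k)
          then splitAt.insert js.1 k else splitAt) splitAt) PySem.Dict.empty)
    = pvSplit xs i prod := by
  rw [PySem.List.len_eq, pvRange_shift, List.foldl_map]
  unfold pvSplit pvSij
  rw [List.foldl_flatMap]
  apply PySem.List.foldl_congr_mem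
  intro sp t ht
  have ht' : t < prod.length := List.mem_range.1 ht
  have hslice : PySem.List.slice prod none (some ((1 : Int) + (t : Int))) = prod.take (t + 1) :=
    pvSliceShift prod t
  have hne : prod.take (t + 1) ≠ [] := by
    have hl : (prod.take (t + 1)).length = t + 1 := by rw [List.length_take]; omega
    intro h
    rw [h] at hl
    simp at hl
  have hget : PySem.List.pyGet? prod ((1 : Int) + (t : Int)) = prod[t + 1]? := by
    have h1 : ((1 : Int) + (t : Int)) = (((t + 1 : Nat) : Int)) := by push_cast; ring
    rw [h1, PySem.List.pyGet?_natCast]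
  rw [hslice, pvOccs_getD xs _ hne, hget]
  refine Eq.trans (PySem.List.foldl_ite_eq_foldl_filter
    (fun js : Int × Option String => i < js.1 ∧ (prod[t + 1]? = none ∨ js.2 ≠ prod[t + 1]?))
    (fun (sp : PySem.Dict Int Int) (js : Int × Option String) =>
      sp.insert js.1 ((1 : Int) + (t : Int))) _ _) ?_
  unfold pvBlock
  rw [List.foldl_map]
  apply PySem.List.foldl_congr_mem
  intro sp js _
  have h1 : ((1 : Int) + (t : Int)) = (((t + 1 : Nat) : Int)) := by push_cast; ring
  rw [h1]

-- ---------- per-production equality of the two inner loops ----------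

lemma pvGetD_toNat (xs : List (List String)) (jm : Nat) (h : jm < xs.length) :
    PySem.List.pyGetD xs (jm : Int) [] = xs[jm] := by
  rw [PySem.List.pyGetD_eq_getElem xs [] (by positivity) (by exact_mod_cast h)]
  simp

lemma pvInner_eq (xs : List (List String)) (i : Int) (hi : 0 ≤ i) (prod : List String)
    (d : PySem.Dict (List String) (PySem.Set Int)) :
    ((PySem.List.pyRange (i + 1) (PySem.List.len xs)).foldl (fun prefixes j =>
      let prod_i := prod
      let prod_j := PySem.List.pyGetD xs j []
      let k : Int := (pvLcpLen prod_i prod_j : Int)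
      if 0 < k then
        let pfx := PySem.List.slice prod_i none (some k)
        if prefixes.contains pfx = false then
          prefixes.insert pfx (PySem.Set.ofList [i, j])
        else
          prefixes.modify pfx [] (fun s => (PySem.Set.add s i).add j)
      else prefixes) d)
    = ((PySem.List.sorted (pvSplit xs i prod).keys (fun j => j) false).foldl (fun prefixes j =>
        prefixes.modify
          (PySem.List.slice prod none (some ((pvSplit xs i prod).getD j 0))) []
          (fun s => (PySem.Set.add s i).add j)) d) := by
  rw [pvSorted_keys xs i hi prod,
    show pvLA xs i prod = (PySem.List.pyRange (i + 1) (PySem.List.len xs)).filter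
      (fun j => decide ((0 : Int) < (pvLcpLen prod (PySem.List.pyGetD xs j []) : Int))) from rfl]
  have hA : ∀ (d : PySem.Dict (List String) (PySem.Set Int)) (j : Int),
      j ∈ PySem.List.pyRange (i + 1) (PySem.List.len xs) →
      (if (0 : Int) < ((pvLcpLen prod (PySem.List.pyGetD xs j []) : Nat) : Int) then
        (if d.contains (PySem.List.slice prod none
              (some ((pvLcpLen prod (PySem.List.pyGetD xs j []) : Nat) : Int))) = false then
          d.insert (PySem.List.slice prod none
              (some ((pvLcpLen prod (PySem.List.pyGetD xs j []) : Nat) : Int)))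
            (PySem.Set.ofList [i, j])
        else
          d.modify (PySem.List.slice prod none
              (some ((pvLcpLen prod (PySem.List.pyGetD xs j []) : Nat) : Int))) []
            (fun s => (PySem.Set.add s i).add j))
      else d)
      = (if (0 : Int) < ((pvLcpLen prod (PySem.List.pyGetD xs j []) : Nat) : Int) then
          d.modify (PySem.List.slice prod none
              (some ((pvLcpLen prod (PySem.List.pyGetD xs j []) : Nat) : Int))) []
            (fun s => (PySem.Set.add s i).add j)
        else d) := by
    intro d j _
    by_cases hk : (0 : Int) < ((pvLcpLen prod (PySem.List.pyGetD xs j []) : Nat) : Int)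
    · rw [if_pos hk, if_pos hk]
      exact pvModify_branch d _ i j
    · rw [if_neg hk, if_neg hk]
  refine Eq.trans (PySem.List.foldl_congr_mem _ _ _ _ hA) ?_
  refine Eq.trans (PySem.List.foldl_ite_eq_foldl_filter
    (fun j : Int => (0 : Int) < ((pvLcpLen prod (PySem.List.pyGetD xs j []) : Nat) : Int))
    (fun (d : PySem.Dict (List String) (PySem.Set Int)) (j : Int) => d.modify
      (PySem.List.slice prod none (some ((pvLcpLen prod (PySem.List.pyGetD xs j []) : Nat) : Int))) []
      (fun s => (PySem.Set.add s i).add j)) _ _) ?_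
  apply PySem.List.foldl_congr_mem
  intro d j hj
  rcases (pvLA_mem xs i hi prod j).1 hj with ⟨jm, hjm, rfl, hij, hpos⟩
  rw [pvGetD_toNat xs jm hjm, pvSplit_getD xs i prod jm hjm hij hpos]

lemma pvInnerRaw_eq (xs : List (List String)) (i : Int) (hi : 0 ≤ i) (prod : List String)
    (d : PySem.Dict (List String) (PySem.Set Int)) :
    ((PySem.List.pyRange (i + 1) (PySem.List.len xs)).foldl (fun prefixes j =>
      let prod_i := prod
      let prod_j := PySem.List.pyGetD xs j []
      let k : Int := (pvLcpLen prod_i prod_j : Int)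
      if 0 < k then
        let pfx := PySem.List.slice prod_i none (some k)
        if prefixes.contains pfx = false then
          prefixes.insert pfx (PySem.Set.ofList [i, j])
        else
          prefixes.modify pfx [] (fun s => (PySem.Set.add s i).add j)
      else prefixes) d)
    = ((PySem.List.sorted
          (((PySem.List.pyRange 1 (PySem.List.len prod + 1)).foldl (fun splitAt k =>
            ((pvOccs xs).getD (PySem.List.slice prod none (some k)) []).foldl (fun splitAt js =>
              if i < js.1 ∧ (PySem.List.pyGet? prod k = none ∨ js.2 ≠ PySem.List.pyGet? prod k)
              then splitAt.insert js.1 k else splitAt) splitAt) PySem.Dict.empty).keys)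
          (fun j => j) false).foldl (fun prefixes j =>
        prefixes.modify
          (PySem.List.slice prod none
            (some (((PySem.List.pyRange 1 (PySem.List.len prod + 1)).foldl (fun splitAt k =>
              ((pvOccs xs).getD (PySem.List.slice prod none (some k)) []).foldl (fun splitAt js =>
                if i < js.1 ∧ (PySem.List.pyGet? prod k = none ∨ js.2 ≠ PySem.List.pyGet? prod k)
                then splitAt.insert js.1 k else splitAt) splitAt) PySem.Dict.empty).getD j 0))) []
          (fun s => (PySem.Set.add s i).add j)) d) := by
  rw [pvBInner_eq xs i prod]
  exact pvInner_eq xs i hi prod d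

-- ---------- assembling the two programs ----------

lemma pvAlt_eq (xs : List (List String)) :
    find_common_prefixes_alt xs = PySem.Dict.items
      ((PySem.List.enumerate xs).foldl (fun prefixes ip =>
        let splitAt : PySem.Dict Int Int :=
          (PySem.List.pyRange 1 (PySem.List.len ip.2 + 1)).foldl (fun splitAt k =>
            let here := PySem.List.pyGet? ip.2 k
            ((pvOccs xs).getD (PySem.List.slice ip.2 none (some k)) []).foldl (fun splitAt js =>
              if ip.1 < js.1 ∧ (here = none ∨ js.2 ≠ here) then splitAt.insert js.1 k
              else splitAt) splitAt) PySem.Dict.empty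
        (PySem.List.sorted splitAt.keys (fun j => j) false).foldl (fun prefixes j =>
          prefixes.modify (PySem.List.slice ip.2 none (some (splitAt.getD j 0))) []
            (fun s => (PySem.Set.add s ip.1).add j)) prefixes)
        (PySem.Dict.empty : PySem.Dict (List String) (PySem.Set Int))) := rfl

theorem pvMain (xs : List (List String)) :
    find_common_prefixes xs = find_common_prefixes_alt xs := by
  rw [pvAlt_eq xs]
  show PySem.Dict.items ((PySem.List.pyRange 0 (PySem.List.len xs)).foldl _
        (PySem.Dict.empty : PySem.Dict (List String) (PySem.Set Int)))
      = _
  congr 1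
  rw [PySem.List.enumerate_eq_map_pyRange xs [], List.foldl_map]
  apply PySem.List.foldl_congr_mem
  intro d i hi
  have hi0 : 0 ≤ i := by
    rw [PySem.List.mem_pyRange_one] at hi
    omega
  exact pvInnerRaw_eq xs i hi0 (PySem.List.pyGetD xs i []) d

-- ===== VERDICT (by name: the statement is the Claim_ definition above) =====
theorem find_common_prefixes_spec : Claim_equal_find_common_prefixes := by
  intro productions _
  show find_common_prefixes productions = find_common_prefixes_alt productions
  exact pvMain productions
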